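-- pv_equiv track=rewrite | github.com/ymittal/TextAnalyzer | tryTextCloudDisplay.py | extreme
-- ===== SOURCE A (Python) =====
-- def extreme(wordList, max_min):
--     max, min = 0, 0
--     for i in range(len(wordList)):
--         if wordList[i][1] < wordList[min][1]:
--             min = i
--         if wordList[i][1] > wordList[max][1]:
--             max = i
--     return (max if max_min else min)
-- ===== SOURCE B (Python) =====
-- def extreme(wordList, max_min):
--     counts = [c for _, c in wordList]
--     target = max(counts) if max_min else min(counts)
--     return counts.index(target)
-- ===== Notes on version B (the rewrite author's own statement) =====
-- stated objective: idiomatic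
-- what changed: Replaces the manual index-tracking loop over range(len(wordList)) by extracting the counts, taking the builtin max/min value, and returning its first index via list.index (first occurrence matches A's strict-comparison tie behaviour).
-- outside the precondition, e.g. on extreme([], True): A returns 0, B raises ValueError
import Mathlib
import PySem

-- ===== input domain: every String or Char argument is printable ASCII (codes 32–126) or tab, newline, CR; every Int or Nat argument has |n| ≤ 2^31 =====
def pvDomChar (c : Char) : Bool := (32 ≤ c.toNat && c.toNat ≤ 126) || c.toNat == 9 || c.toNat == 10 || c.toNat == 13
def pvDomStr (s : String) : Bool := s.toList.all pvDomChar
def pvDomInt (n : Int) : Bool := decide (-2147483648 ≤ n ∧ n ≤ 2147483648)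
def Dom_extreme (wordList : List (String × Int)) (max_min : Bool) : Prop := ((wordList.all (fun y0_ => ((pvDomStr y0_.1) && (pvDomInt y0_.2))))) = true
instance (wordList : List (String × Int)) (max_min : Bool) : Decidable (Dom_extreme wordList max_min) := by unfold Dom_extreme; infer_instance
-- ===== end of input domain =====

-- B replaces A's manual index-tracking loop by max/min of the count list plus list.index (idiomatic decomposition, same cost).

-- ===== PORT A =====
-- wordList[i][1]; the default is for totality only — every index the loop reaches is in range
def pvCnt (wordList : List (String × Int)) (i : Int) : Int :=
  (PySem.List.pyGetD wordList i ("", 0)).2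

def extreme (wordList : List (String × Int)) (max_min : Bool) : Int :=
  let st := (PySem.List.pyRange 0 wordList.length 1).foldl
    (fun (s : Int × Int) (i : Int) =>
      let mn := if pvCnt wordList i < pvCnt wordList s.2 then i else s.2
      let mx := if pvCnt wordList i > pvCnt wordList s.1 then i else s.1
      (mx, mn)) (0, 0)
  if max_min then st.1 else st.2

-- ===== PORT B =====
def extreme_alt (wordList : List (String × Int)) (max_min : Bool) : Int :=
  let counts := wordList.map (·.2)
  let target := if max_min then (PySem.List.max? counts (fun y => y)).getD 0
                else (PySem.List.min? counts (fun y => y)).getD 0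
  ((PySem.List.index? counts target).map Int.ofNat).getD 0

-- ===== PRECONDITION & SPEC =====
-- Pre_ excludes the empty list: A returns its never-checked initial index 0 there, while B's natural max()/min() call raises ValueError.
def Pre_extreme (wordList : List (String × Int)) (max_min : Bool) : Prop := wordList ≠ []
instance (wordList : List (String × Int)) (max_min : Bool) : Decidable (Pre_extreme wordList max_min) := by unfold Pre_extreme; infer_instance
def pvWitness_extreme : (List (String × Int)) × Bool := ([("a", 2), ("b", 5), ("c", 1)], true)

def Spec_extreme (wordList : List (String × Int)) (max_min : Bool) (out : Int) : Prop := out = extreme_alt wordList max_min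
instance (wordList : List (String × Int)) (max_min : Bool) (out : Int) : Decidable (Spec_extreme wordList max_min out) := by unfold Spec_extreme; infer_instance

-- ===== CLAIM (what is proved, stated in full; the proofs are below) =====
def Claim_equal_extreme : Prop := ∀ (wordList : List (String × Int)) (max_min : Bool), Dom_extreme wordList max_min → Pre_extreme wordList max_min → Spec_extreme wordList max_min (extreme wordList max_min)

-- ===== LEMMAS AND PROOFS =====

theorem pvCnt_eq (wordList : List (String × Int)) (j : Nat) (hj : j < wordList.length) :
    pvCnt wordList (j : Int) = (wordList.map (·.2)).getD j 0 := by
  simp [pvCnt, PySem.List.pyGetD_natCast, List.getD, List.getElem?_eq_getElem hj,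
    List.getElem?_eq_getElem (by simpa using hj : j < (wordList.map (·.2)).length)]

theorem pvLoopInv (wordList : List (String × Int)) (k : Nat) (hk : 1 ≤ k)
    (hkn : k ≤ wordList.length) :
    ∃ a b : Nat,
      (PySem.List.pyRange 0 (k : Int) 1).foldl
        (fun (s : Int × Int) (i : Int) =>
          let mn := if pvCnt wordList i < pvCnt wordList s.2 then i else s.2
          let mx := if pvCnt wordList i > pvCnt wordList s.1 then i else s.1
          (mx, mn)) (0, 0) = ((a : Int), (b : Int)) ∧
      a < k ∧ b < k ∧
      (∀ j, j < k → (wordList.map (·.2)).getD j 0 ≤ (wordList.map (·.2)).getD a 0) ∧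
      (∀ j, j < a → (wordList.map (·.2)).getD j 0 < (wordList.map (·.2)).getD a 0) ∧
      (∀ j, j < k → (wordList.map (·.2)).getD b 0 ≤ (wordList.map (·.2)).getD j 0) ∧
      (∀ j, j < b → (wordList.map (·.2)).getD b 0 < (wordList.map (·.2)).getD j 0) := by
  induction k, hk using Nat.le_induction with
  | base =>
    refine ⟨0, 0, ?_, by omega, by omega, ?_, by omega, ?_, by omega⟩
    · show (PySem.List.pyRange 0 (1:Int) 1).foldl _ (0,0) = _
      norm_num
      rw [show PySem.List.pyRange 0 1 1 = [0] from by decide]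
      simp
    · intro j hj; interval_cases j; rfl
    · intro j hj; interval_cases j; rfl
  | succ k hk ih =>
    obtain ⟨a, b, hfold, ha, hb, hamax, hastrict, hbmin, hbstrict⟩ := ih (by omega)
    rw [show ((k+1:Nat):Int) = (k:Int)+1 by push_cast; ring,
      PySem.List.pyRange_one_succ_right (by positivity), List.foldl_append, hfold]
    simp only [List.foldl_cons, List.foldl_nil]
    have hck := pvCnt_eq wordList k (by omega)
    have hca := pvCnt_eq wordList a (by omega)
    have hcb := pvCnt_eq wordList b (by omega)
    by_cases hmx : pvCnt wordList (k:Int) > pvCnt wordList (a:Int) <;>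
      by_cases hmn : pvCnt wordList (k:Int) < pvCnt wordList (b:Int)
    · refine ⟨k, k, by simp [hmx, hmn], by omega, by omega, ?_, ?_, ?_, ?_⟩ <;>
        intro j hj
      · rcases Nat.lt_succ_iff_lt_or_eq.mp hj with h | h
        · exact le_of_lt (lt_of_le_of_lt (hamax j h) (by rw [hca, hck] at hmx; exact hmx))
        · subst h; rfl
      · exact lt_of_le_of_lt (hamax j hj) (by rw [hca, hck] at hmx; exact hmx)
      · rcases Nat.lt_succ_iff_lt_or_eq.mp hj with h | h
        · exact le_of_lt (lt_of_lt_of_le (by rw [hcb, hck] at hmn; exact hmn) (hbmin j h))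
        · subst h; rfl
      · exact lt_of_lt_of_le (by rw [hcb, hck] at hmn; exact hmn) (hbmin j hj)
    · refine ⟨k, b, by simp [hmx, hmn], by omega, by omega, ?_, ?_, ?_, hbstrict⟩
      · intro j hj
        rcases Nat.lt_succ_iff_lt_or_eq.mp hj with h | h
        · exact le_of_lt (lt_of_le_of_lt (hamax j h) (by rw [hca, hck] at hmx; exact hmx))
        · subst h; rfl
      · intro j hj
        exact lt_of_le_of_lt (hamax j hj) (by rw [hca, hck] at hmx; exact hmx)
      · intro j hj
        rcases Nat.lt_succ_iff_lt_or_eq.mp hj with h | h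
        · exact hbmin j h
        · subst h; rw [hcb, hck] at hmn; omega
    · refine ⟨a, k, by simp [hmx, hmn], by omega, by omega, ?_, hastrict, ?_, ?_⟩
      · intro j hj
        rcases Nat.lt_succ_iff_lt_or_eq.mp hj with h | h
        · exact hamax j h
        · subst h; rw [hca, hck] at hmx; omega
      · intro j hj
        rcases Nat.lt_succ_iff_lt_or_eq.mp hj with h | h
        · exact le_of_lt (lt_of_lt_of_le (by rw [hcb, hck] at hmn; exact hmn) (hbmin j h))
        · subst h; rfl
      · intro j hj
        exact lt_of_lt_of_le (by rw [hcb, hck] at hmn; exact hmn) (hbmin j hj)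
    · refine ⟨a, b, by simp [hmx, hmn], by omega, by omega, ?_, hastrict, ?_, hbstrict⟩
      · intro j hj
        rcases Nat.lt_succ_iff_lt_or_eq.mp hj with h | h
        · exact hamax j h
        · subst h; rw [hca, hck] at hmx; omega
      · intro j hj
        rcases Nat.lt_succ_iff_lt_or_eq.mp hj with h | h
        · exact hbmin j h
        · subst h; rw [hcb, hck] at hmn; omega

theorem pvIndexFirst (cs : List Int) (a : Nat) (ha : a < cs.length)
    (hne : ∀ j, j < a → cs.getD j 0 ≠ cs.getD a 0) :
    PySem.List.index? cs (cs.getD a 0) = some a := by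
  rw [PySem.List.index?_eq_some_iff]
  refine ⟨cs.take a, cs.drop (a+1), ?_, ?_, ?_⟩
  · conv_lhs => rw [← List.take_append_drop a cs]
    rw [List.drop_eq_getElem_cons ha]
    simp [List.getD, List.getElem?_eq_getElem ha]
  · simp [List.length_take]; omega
  · intro hmem
    obtain ⟨j, hj, hjv⟩ := List.mem_iff_getElem.mp hmem
    have hj' : j < a := by have h2 := hj; simp [List.length_take] at h2; omega
    have hjn : j < cs.length := by omega
    have : cs.getD j 0 = cs.getD a 0 := by
      simp only [List.getD, List.getElem?_eq_getElem hjn,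
        List.getElem?_eq_getElem ha, Option.getD_some]
      simpa [List.getElem_take, List.getD, List.getElem?_eq_getElem ha] using hjv
    exact hne j hj' this

theorem pvFoldlMaxEq (c : Int) (t : List Int) (a : Nat) (ha : a < (c :: t).length)
    (hmax : ∀ j, j < (c :: t).length → (c :: t).getD j 0 ≤ (c :: t).getD a 0) :
    t.foldl max c = (c :: t).getD a 0 := by
  have hgd : (c :: t).getD a 0 = (c :: t)[a] := by
    simp [List.getD, List.getElem?_eq_getElem ha]
  apply le_antisymm
  · rcases PySem.List.foldl_max_mem t c with h | h
    · obtain ⟨j, hj, hjv⟩ := List.mem_iff_getElem.mp (show t.foldl max c ∈ c :: t by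
        rcases PySem.List.foldl_max_mem t c with h' | h'
        · rw [h']; exact List.mem_cons_self
        · exact List.mem_cons_of_mem _ h')
      rw [← hjv, hgd] ; have := hmax j hj
      simp only [List.getD, List.getElem?_eq_getElem hj, List.getElem?_eq_getElem ha,
        Option.getD_some] at this
      exact this
    · obtain ⟨j, hj, hjv⟩ := List.mem_iff_getElem.mp (List.mem_cons_of_mem c h)
      rw [← hjv, hgd]; have := hmax j hj
      simp only [List.getD, List.getElem?_eq_getElem hj, List.getElem?_eq_getElem ha,
        Option.getD_some] at this
      exact this
  · have hm : (c :: t)[a] ∈ c :: t := List.getElem_mem ha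
    rw [hgd]
    rcases List.mem_cons.mp hm with h | h
    · rw [h]; exact (PySem.List.le_foldl_max t c).1
    · exact (PySem.List.le_foldl_max t c).2 _ h

theorem pvFoldlMinEq (c : Int) (t : List Int) (b : Nat) (hb : b < (c :: t).length)
    (hmin : ∀ j, j < (c :: t).length → (c :: t).getD b 0 ≤ (c :: t).getD j 0) :
    t.foldl min c = (c :: t).getD b 0 := by
  have hgd : (c :: t).getD b 0 = (c :: t)[b] := by
    simp [List.getD, List.getElem?_eq_getElem hb]
  apply le_antisymm
  · have hm : (c :: t)[b] ∈ c :: t := List.getElem_mem hb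
    rw [hgd]
    rcases List.mem_cons.mp hm with h | h
    · rw [h]; exact (PySem.List.foldl_min_le t c).1
    · exact (PySem.List.foldl_min_le t c).2 _ h
  · obtain ⟨j, hj, hjv⟩ := List.mem_iff_getElem.mp (show t.foldl min c ∈ c :: t by
      rcases PySem.List.foldl_min_mem t c with h' | h'
      · rw [h']; exact List.mem_cons_self
      · exact List.mem_cons_of_mem _ h')
    rw [← hjv, hgd]; have := hmin j hj
    simp only [List.getD, List.getElem?_eq_getElem hj, List.getElem?_eq_getElem hb,
      Option.getD_some] at this
    exact this

theorem pvMainEq (wordList : List (String × Int)) (max_min : Bool)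
    (hpre : wordList ≠ []) :
    (let st := (PySem.List.pyRange 0 wordList.length 1).foldl
        (fun (s : Int × Int) (i : Int) =>
          let mn := if pvCnt wordList i < pvCnt wordList s.2 then i else s.2
          let mx := if pvCnt wordList i > pvCnt wordList s.1 then i else s.1
          (mx, mn)) (0, 0)
     if max_min then st.1 else st.2) =
    (let counts := wordList.map (·.2)
     let target := if max_min then (PySem.List.max? counts (fun y => y)).getD 0
                  else (PySem.List.min? counts (fun y => y)).getD 0
     ((PySem.List.index? counts target).map Int.ofNat).getD 0) := by
  have hn : 1 ≤ wordList.length := List.length_pos_of_ne_nil hpre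
  obtain ⟨a, b, hfold, ha, hb, hamax, hastrict, hbmin, hbstrict⟩ :=
    pvLoopInv wordList wordList.length hn le_rfl
  have hcsne : wordList.map (·.2) ≠ [] := by simpa using hpre
  obtain ⟨c, t, hct⟩ := List.exists_cons_of_ne_nil hcsne
  have hlen : (wordList.map (·.2)).length = wordList.length := by simp
  simp only [hfold]
  cases max_min
  · -- min branch
    simp only [Bool.false_eq_true, reduceIte]
    have htgt : (PySem.List.min? (wordList.map (·.2)) (fun y => y)).getD 0
        = (wordList.map (·.2)).getD b 0 := by
      rw [hct, PySem.List.min?_id_cons, Option.getD_some, ← hct]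
      rw [hct] at hbmin ⊢
      exact pvFoldlMinEq c t b (by rw [← hct]; omega) (fun j hj => hbmin j (by
        rw [← hct, hlen] at hj; exact hj))
    rw [htgt, pvIndexFirst (wordList.map (·.2)) b (by omega)
      (fun j hj => ne_of_gt (hbstrict j hj))]
    simp
  · -- max branch
    simp only [reduceIte]
    have htgt : (PySem.List.max? (wordList.map (·.2)) (fun y => y)).getD 0
        = (wordList.map (·.2)).getD a 0 := by
      rw [hct, PySem.List.max?_id_cons, Option.getD_some, ← hct]
      rw [hct] at hamax ⊢
      exact pvFoldlMaxEq c t a (by rw [← hct]; omega) (fun j hj => hamax j (by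
        rw [← hct, hlen] at hj; exact hj))
    rw [htgt, pvIndexFirst (wordList.map (·.2)) a (by omega)
      (fun j hj => (hastrict j hj).ne)]
    simp

-- ===== VERDICT (by name: the statement is the Claim_ definition above) =====
theorem extreme_spec : Claim_equal_extreme := by
  intro wordList max_min _ hpre
  show extreme wordList max_min = extreme_alt wordList max_min
  unfold extreme extreme_alt
  exact pvMainEq wordList max_min hpre
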